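-- pv_equiv track=rewrite | github.com/take4ff/gmp | old_file/20250710/20250705_filter2.py | get_non_encompassed_sequences_fast
-- ===== SOURCE A (Python) =====
-- def is_sublist_optimized(sublist, mainlist):
--     """最適化されたサブリストチェック"""
--     if not sublist:
--         return True
--     if len(sublist) > len(mainlist):
--         return False
--
--     # KMP法の簡易版（効率的な文字列検索アルゴリズム）
--     for i in range(len(mainlist) - len(sublist) + 1):
--         if mainlist[i:i+len(sublist)] == sublist:
--             return True
--     return False
--
-- def get_non_encompassed_sequences_fast(sequences):
--     """最高速版：ハッシュベース"""
--     if not sequences: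
--         return []
--
--     # 重複除去とタプル化
--     unique_tuples = list(dict.fromkeys(tuple(path) for path in sequences))
--
--     if len(unique_tuples) <= 1:
--         return [list(t) for t in unique_tuples]
--
--     # 長さでグループ化
--     length_groups = {}
--     for seq_tuple in unique_tuples:
--         length = len(seq_tuple)
--         if length not in length_groups:
--             length_groups[length] = []
--         length_groups[length].append(seq_tuple)
--
--     # 長さ順にソート
--     sorted_lengths = sorted(length_groups.keys())
--
--     non_encompassed = []
--     encompassed_sets = set()  # 内包されたシーケンスを記録
--
--     for length in sorted_lengths:
--         group = length_groups[length]
--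
--         for seq_tuple in group:
--             if seq_tuple in encompassed_sets:
--                 continue
--
--             is_encompassed = False
--             seq_list = list(seq_tuple)
--
--             # より短いシーケンスでの内包チェック
--             for shorter_tuple in non_encompassed:
--                 if is_sublist_optimized(list(shorter_tuple), seq_list):
--                     is_encompassed = True
--                     break
--
--             if not is_encompassed:
--                 non_encompassed.append(seq_tuple)
--
--                 # この新しいシーケンスが内包する可能性のある長いシーケンスをマーク
--                 for longer_length in range(length + 1, max(sorted_lengths) + 1):
--                     if longer_length in length_groups:
--                         for longer_tuple in length_groups[longer_length]:
--                             if is_sublist_optimized(seq_list, list(longer_tuple)):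
--                                 encompassed_sets.add(longer_tuple)
--
--     return [list(t) for t in non_encompassed]
-- ===== SOURCE B (Python) =====
-- def get_non_encompassed_sequences_fast(sequences):
--     """Keep each unique sequence (shortest first) unless an already-kept
--     sequence occurs in it; containment is tested by membership in hash sets
--     of the candidate's windows, one set per kept length."""
--     kept = []
--     lengths = set()
--     for seq in sorted(dict.fromkeys(map(tuple, sequences)), key=len):
--         n = len(seq)
--         covered = False
--         for L in lengths:
--             if L > n:
--                 continue
--             windows = {seq[i:i + L] for i in range(n - L + 1)}
--             if any(k in windows for k in kept if len(k) == L):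
--                 covered = True
--                 break
--         if not covered:
--             kept.append(seq)
--             lengths.add(n)
--     return [list(t) for t in kept]
-- ===== Notes on version B (the rewrite author's own statement) =====
-- stated objective: alternative
-- what changed: Replaces the length-grouping dict, the forward 'encompassed' marking set and the naive per-pattern window scan with one stable sort by length and, per candidate, hash sets of its fixed-length windows (one per kept length) that kept sequences are looked up in.
import Mathlib
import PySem

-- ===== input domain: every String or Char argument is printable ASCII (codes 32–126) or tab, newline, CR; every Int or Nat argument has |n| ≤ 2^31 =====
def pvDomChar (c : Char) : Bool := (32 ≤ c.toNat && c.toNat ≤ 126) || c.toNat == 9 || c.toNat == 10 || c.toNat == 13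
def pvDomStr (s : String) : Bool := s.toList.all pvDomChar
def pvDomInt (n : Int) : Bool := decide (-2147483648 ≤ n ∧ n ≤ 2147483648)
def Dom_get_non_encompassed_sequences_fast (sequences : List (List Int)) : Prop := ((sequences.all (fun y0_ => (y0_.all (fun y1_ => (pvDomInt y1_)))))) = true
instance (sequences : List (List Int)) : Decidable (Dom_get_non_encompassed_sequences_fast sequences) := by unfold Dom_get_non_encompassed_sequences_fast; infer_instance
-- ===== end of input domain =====

-- B replaces A's length-grouping dict, forward 'encompassed' marking and naive window scan
-- by one stable sort by length plus, per candidate, hash sets of its fixed-length windows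
-- (one per kept length) that kept sequences are looked up in (objective: alternative).

-- ===== PORT A =====
def is_sublist_optimized (sublist mainlist : List Int) : Bool :=
  if sublist = [] then true
  else if decide (mainlist.length < sublist.length) then false
  else (PySem.List.pyRange 0 ((mainlist.length : Int) - (sublist.length : Int) + 1) 1).any
        (fun i => PySem.List.slice mainlist (some i) (some (i + (sublist.length : Int))) == sublist)

-- 'if length not in length_groups: length_groups[length] = []' then '.append(seq_tuple)'
def aGroupStep (d : PySem.Dict Int (List (List Int))) (t : List Int) :
    PySem.Dict Int (List (List Int)) :=
  let d' := if d.contains (t.length : Int) then d else d.insert (t.length : Int) []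
  d'.insert (t.length : Int) (d'.getD (t.length : Int) [] ++ [t])

def aGroups (u : List (List Int)) : PySem.Dict Int (List (List Int)) :=
  u.foldl aGroupStep PySem.Dict.empty

-- body of 'for seq_tuple in group' (the marking loop over range(length+1, max+1) included)
def aBody (groups : PySem.Dict Int (List (List Int))) (maxLen ℓ : Int)
    (st : List (List Int) × PySem.Set (List Int)) (t : List Int) :
    List (List Int) × PySem.Set (List Int) :=
  if PySem.Set.contains st.2 t then st
  else if st.1.any (fun k => is_sublist_optimized k t) then st
  else (st.1 ++ [t],
    (PySem.List.pyRange (ℓ + 1) (maxLen + 1) 1).foldl (fun e ℓ' =>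
      if groups.contains ℓ' then
        (groups.getD ℓ' []).foldl (fun e2 t' =>
          if is_sublist_optimized t t' then PySem.Set.add e2 t' else e2) e
      else e) st.2)

def get_non_encompassed_sequences_fast (sequences : List (List Int)) : List (List Int) :=
  if sequences = [] then []
  else
    let unique_tuples := PySem.List.dedup sequences
    if unique_tuples.length ≤ 1 then unique_tuples.map (fun t => t)
    else
      let length_groups := aGroups unique_tuples
      let sorted_lengths := PySem.List.sorted length_groups.keys (fun x => x) false
      -- max(sorted_lengths): the list is nonempty on this branch, so the default is unreachable
      let maxLen := (PySem.List.max? sorted_lengths (fun x => x)).getD 0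
      ((sorted_lengths.foldl (fun st ℓ =>
          (length_groups.getD ℓ []).foldl (aBody length_groups maxLen ℓ) st)
        ([], PySem.Set.empty)).1).map (fun t => t)

-- ===== PORT B =====
-- {seq[i:i+L] for i in range(n - L + 1)}
def bWindows (seq : List Int) (L : Int) : PySem.Set (List Int) :=
  PySem.Set.ofList
    ((PySem.List.pyRange 0 ((seq.length : Int) - L + 1) 1).map (fun i =>
      PySem.List.slice seq (some i) (some (i + L))))

-- body of 'for seq in sorted(...)': state = (kept, lengths)
def bStep (st : List (List Int) × PySem.Set Int) (seq : List Int) :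
    List (List Int) × PySem.Set Int :=
  let covered := List.any st.2 (fun L =>
    if (seq.length : Int) < L then false   -- 'continue'
    else (st.1.filter (fun k => (k.length : Int) == L)).any (fun k =>
      PySem.Set.contains (bWindows seq L) k))
  if covered then st else (st.1 ++ [seq], PySem.Set.add st.2 (seq.length : Int))

def get_non_encompassed_sequences_fast_alt (sequences : List (List Int)) : List (List Int) :=
  (((PySem.List.sorted (PySem.List.dedup (sequences.map (fun p => p)))
      (fun s => (s.length : Int)) false).foldl bStep ([], PySem.Set.empty)).1).map (fun t => t)

-- ===== PRECONDITION & SPEC =====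
def Spec_get_non_encompassed_sequences_fast (sequences : List (List Int)) (out : List (List Int)) : Prop := out = get_non_encompassed_sequences_fast_alt sequences
instance (sequences : List (List Int)) (out : List (List Int)) : Decidable (Spec_get_non_encompassed_sequences_fast sequences out) := by unfold Spec_get_non_encompassed_sequences_fast; infer_instance

-- ===== CLAIM (what is proved, stated in full; the proofs are below) =====
def Claim_equal_get_non_encompassed_sequences_fast : Prop := ∀ (sequences : List (List Int)), Dom_get_non_encompassed_sequences_fast sequences → Spec_get_non_encompassed_sequences_fast sequences (get_non_encompassed_sequences_fast sequences)

-- ===== LEMMAS AND PROOFS =====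

def keyLen (s : List Int) : Int := (s.length : Int)

theorem aGroupStep_getD (d : PySem.Dict Int (List (List Int))) (t : List Int) (ℓ : Int) :
    (aGroupStep d t).getD ℓ [] =
      if keyLen t = ℓ then d.getD ℓ [] ++ [t] else d.getD ℓ [] := by
  unfold aGroupStep keyLen
  by_cases hc : d.contains (t.length : Int) = true
  · simp only [hc, if_true]
    by_cases he : (t.length : Int) = ℓ
    · rw [he, PySem.Dict.getD_insert_self, if_pos rfl]
    · rw [PySem.Dict.getD_insert_of_ne _ _ _ (Ne.symm he), if_neg he]
  · simp only [Bool.not_eq_true] at hc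
    simp only [hc, Bool.false_eq_true, if_false]
    by_cases he : (t.length : Int) = ℓ
    · rw [he, PySem.Dict.getD_insert_self, PySem.Dict.getD_insert_self, if_pos rfl,
        PySem.Dict.getD_of_not_contains d [] (he ▸ hc)]
    · rw [PySem.Dict.getD_insert_of_ne _ _ _ (Ne.symm he),
        PySem.Dict.getD_insert_of_ne _ _ _ (Ne.symm he), if_neg he]

theorem aGroupStep_keys (d : PySem.Dict Int (List (List Int))) (t : List Int) :
    (aGroupStep d t).keys = PySem.Set.add d.keys (keyLen t) := by
  unfold aGroupStep keyLen
  by_cases hc : d.contains (t.length : Int) = true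
  · simp only [hc, if_true]
    rw [PySem.Dict.keys_insert_of_contains _ _ hc,
      PySem.Set.add_of_mem ((PySem.Dict.contains_iff_mem_keys d _).mp hc)]
  · simp only [Bool.not_eq_true] at hc
    simp only [hc, Bool.false_eq_true, if_false]
    rw [PySem.Dict.keys_insert_of_contains, PySem.Dict.keys_insert_of_not_contains _ _ hc,
      PySem.Set.add_of_not_mem (fun hm => by rw [(PySem.Dict.contains_iff_mem_keys d _).mpr hm] at hc; cases hc)]
    · rw [PySem.Dict.contains_iff_mem_keys, PySem.Dict.keys_insert_of_not_contains _ _ hc]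
      exact List.mem_append_right _ (List.mem_singleton.mpr rfl)

theorem aGroups_getD_gen (u : List (List Int)) (d : PySem.Dict Int (List (List Int))) (ℓ : Int) :
    (u.foldl aGroupStep d).getD ℓ [] = d.getD ℓ [] ++ u.filter (fun s => decide (keyLen s = ℓ)) := by
  induction u generalizing d with
  | nil => simp
  | cons t u ih =>
    rw [List.foldl_cons, ih, List.filter_cons, aGroupStep_getD]
    by_cases he : keyLen t = ℓ
    · simp [he]
    · simp [he]

theorem aGroups_getD (u : List (List Int)) (ℓ : Int) :
    (aGroups u).getD ℓ [] = u.filter (fun s => decide (keyLen s = ℓ)) := by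
  unfold aGroups
  rw [aGroups_getD_gen]
  rfl

theorem aGroups_keys_gen (u : List (List Int)) (d : PySem.Dict Int (List (List Int))) :
    (u.foldl aGroupStep d).keys = PySem.Set.update d.keys (u.map keyLen) := by
  induction u generalizing d with
  | nil => rfl
  | cons t u ih =>
    rw [List.foldl_cons, ih, aGroupStep_keys, List.map_cons, PySem.Set.update_cons]

theorem aGroups_keys (u : List (List Int)) :
    (aGroups u).keys = PySem.Set.ofList (u.map keyLen) := by
  unfold aGroups
  rw [aGroups_keys_gen]
  exact PySem.Set.update_empty _


theorem insertBy_cons_of_before {α : Type} (before : α → α → Bool) (x y : α) (ys : List α)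
    (h : before x y = true) : PySem.List.insertBy before x (y :: ys) = x :: y :: ys := by
  simp [PySem.List.insertBy, h]

theorem insertBy_append_left {α : Type} (before : α → α → Bool) (x : α) (l1 l2 : List α)
    (h : ∀ y ∈ l1, before x y = false) :
    PySem.List.insertBy before x (l1 ++ l2) = l1 ++ PySem.List.insertBy before x l2 := by
  induction l1 with
  | nil => simp
  | cons a l1 ih =>
    simp only [List.cons_append]
    rw [show PySem.List.insertBy before x (a :: (l1 ++ l2)) =
        if before x a = true then x :: a :: (l1 ++ l2) else a :: PySem.List.insertBy before x (l1 ++ l2) from rfl]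
    rw [if_neg (by simp [h a (List.mem_cons_self)]), ih (fun y hy => h y (List.mem_cons_of_mem a hy))]

-- insert into l1 ++ l2 where nothing in l1 triggers and the head of l2 (if any) does
theorem insertBy_split {α : Type} (before : α → α → Bool) (x : α) (l1 l2 : List α)
    (h1 : ∀ y ∈ l1, before x y = false)
    (h2 : ∀ y ∈ l2.head?, before x y = true) :
    PySem.List.insertBy before x (l1 ++ l2) = l1 ++ x :: l2 := by
  rw [insertBy_append_left before x l1 l2 h1]
  cases l2 with
  | nil => rw [PySem.List.insertBy_of_forall_not_before _ _ _ (by simp)]; rfl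
  | cons b l2 => rw [insertBy_cons_of_before _ _ _ _ (h2 b rfl)]

theorem sortedSplit (l : List Int) (v : Int) (h : l.Pairwise (· < ·)) :
    ∃ l1 l2, l = l1 ++ l2 ∧ (∀ y ∈ l1, y < v) ∧ (∀ y ∈ l2, v ≤ y) := by
  induction l with
  | nil => exact ⟨[], [], rfl, by simp, by simp⟩
  | cons a l ih =>
    rw [List.pairwise_cons] at h
    by_cases hav : a < v
    · obtain ⟨l1, l2, heq, hl1, hl2⟩ := ih h.2
      exact ⟨a :: l1, l2, by rw [heq]; rfl, by
        intro y hy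
        rcases List.mem_cons.mp hy with rfl | hy
        · exact hav
        · exact hl1 y hy, hl2⟩
    · refine ⟨[], a :: l, rfl, by simp, ?_⟩
      intro y hy
      rcases List.mem_cons.mp hy with rfl | hy
      · omega
      · have := h.1 y hy; omega

theorem mem_filter_key {u : List (List Int)} {ℓ : Int} {y : List Int}
    (hy : y ∈ u.filter (fun s => decide (keyLen s = ℓ))) : keyLen y = ℓ := by
  have := (List.mem_filter.mp hy).2
  simpa using this

theorem key_of_mem_flatMap {L : List Int} {u : List (List Int)} {y : List Int}
    (hy : y ∈ L.flatMap (fun ℓ => u.filter (fun s => decide (keyLen s = ℓ)))) :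
    keyLen y ∈ L := by
  obtain ⟨ℓ, hℓ, hmem⟩ := List.mem_flatMap.mp hy
  rw [mem_filter_key hmem]; exact hℓ

theorem sorted_len_eq_flatMap (u : List (List Int)) :
    PySem.List.sorted u keyLen false =
      (PySem.List.sorted (PySem.Set.ofList (u.map keyLen)) (fun x => x) false).flatMap
        (fun ℓ => u.filter (fun s => decide (keyLen s = ℓ))) := by
  induction u using List.reverseRecOn with
  | nil => rfl
  | append_singleton u x ih =>
    have hS : PySem.List.sorted (u ++ [x]) keyLen false =
        PySem.List.insertBy (fun a b => decide (keyLen a < keyLen b)) x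
          (PySem.List.sorted u keyLen false) := by
      rw [PySem.List.sorted_eq_foldl_insertBy, PySem.List.sorted_eq_foldl_insertBy,
        List.foldl_append]
      simp
    set L := PySem.List.sorted (PySem.Set.ofList (u.map keyLen)) (fun x => x) false with hL
    have hLpair : L.Pairwise (· < ·) := PySem.List.sorted_ofList_pairwise_lt _
    have hGapp : ∀ ℓ : Int, (u ++ [x]).filter (fun s => decide (keyLen s = ℓ)) =
        u.filter (fun s => decide (keyLen s = ℓ)) ++ (if keyLen x = ℓ then [x] else []) := by
      intro ℓ
      rw [List.filter_append]
      congr 1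
      by_cases he : keyLen x = ℓ <;> simp [he]
    obtain ⟨L1, L2, hsplit, hlt, hge⟩ := sortedSplit L (keyLen x) hLpair
    by_cases hmem : keyLen x ∈ u.map keyLen
    · -- the length is already present: the set, hence L, is unchanged
      have hLnew : PySem.Set.ofList ((u ++ [x]).map keyLen) = PySem.Set.ofList (u.map keyLen) := by
        rw [List.map_append, List.map_singleton, PySem.Set.ofList_append_singleton,
          PySem.Set.add_of_mem (by rw [PySem.Set.mem_ofList]; exact hmem)]
      -- key x occurs in L; L2 starts with it
      have hxL : keyLen x ∈ L := by
        rw [hL, PySem.List.mem_sorted, PySem.Set.mem_ofList]; exact hmem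
      have hxL2 : keyLen x ∈ L2 := by
        rcases List.mem_append.mp (hsplit ▸ hxL) with h1 | h2
        · exact absurd (hlt _ h1) (by omega)
        · exact h2
      obtain ⟨b, L2', rfl⟩ : ∃ b L2', L2 = b :: L2' := by
        cases L2 with
        | nil => cases hxL2
        | cons b L2' => exact ⟨b, L2', rfl⟩
      have hb : b = keyLen x := by
        rcases List.mem_cons.mp hxL2 with h | h
        · omega
        · have hpair2 : (b :: L2').Pairwise (· < ·) :=
            List.Pairwise.sublist (List.sublist_append_right L1 _) (hsplit ▸ hLpair)
          have := (List.pairwise_cons.mp hpair2).1 _ h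
          have := hge b (List.mem_cons_self)
          omega
      subst hb
      have hL2' : ∀ y ∈ L2', keyLen x < y := by
        intro y hy
        have hpair2 : (keyLen x :: L2').Pairwise (· < ·) :=
          List.Pairwise.sublist (List.sublist_append_right L1 _) (hsplit ▸ hLpair)
        exact (List.pairwise_cons.mp hpair2).1 y hy
      rw [hS, ih, List.map_append, List.map_singleton, PySem.Set.ofList_append_singleton,
        PySem.Set.add_of_mem (by rw [PySem.Set.mem_ofList]; exact hmem), ← hL, hsplit]
      rw [List.flatMap_append, List.flatMap_cons, List.flatMap_append, List.flatMap_cons]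
      rw [show L1.flatMap (fun ℓ => (u ++ [x]).filter (fun s => decide (keyLen s = ℓ))) =
            L1.flatMap (fun ℓ => u.filter (fun s => decide (keyLen s = ℓ))) from
        List.flatMap_congr (fun ℓ hℓ => by
          rw [hGapp ℓ, if_neg (by have := hlt ℓ hℓ; omega), List.append_nil])]
      rw [show L2'.flatMap (fun ℓ => (u ++ [x]).filter (fun s => decide (keyLen s = ℓ))) =
            L2'.flatMap (fun ℓ => u.filter (fun s => decide (keyLen s = ℓ))) from
        List.flatMap_congr (fun ℓ hℓ => by
          rw [hGapp ℓ, if_neg (by have := hL2' ℓ hℓ; omega), List.append_nil])]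
      rw [hGapp (keyLen x), if_pos rfl]
      rw [← List.append_assoc]
      rw [insertBy_split _ x (L1.flatMap (fun ℓ => u.filter (fun s => decide (keyLen s = ℓ))) ++
            u.filter (fun s => decide (keyLen s = keyLen x)))
          (L2'.flatMap (fun ℓ => u.filter (fun s => decide (keyLen s = ℓ))))
          ?_ ?_]
      · simp
      · intro y hy
        rcases List.mem_append.mp hy with h1 | h2
        · have := hlt _ (key_of_mem_flatMap h1); simp; omega
        · have := mem_filter_key h2; simp; omega
      · intro y hy
        have := hL2' _ (key_of_mem_flatMap (List.mem_of_mem_head? hy))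
        simp; omega

    · have hnotL : keyLen x ∉ L := by
        rw [hL, PySem.List.mem_sorted, PySem.Set.mem_ofList]; exact hmem
      have hL2 : ∀ y ∈ L2, keyLen x < y := by
        intro y hy
        have h1 := hge y hy
        have h2 : y ≠ keyLen x := fun he => hnotL (he ▸ hsplit ▸ List.mem_append_right L1 hy)
        omega
      have hGx : u.filter (fun s => decide (keyLen s = keyLen x)) = [] := by
        rw [List.filter_eq_nil_iff]
        intro s hs hds
        exact hmem (List.mem_map.mpr ⟨s, hs, of_decide_eq_true hds⟩)
      have hLnew : PySem.List.sorted (PySem.Set.ofList ((u ++ [x]).map keyLen)) (fun x => x) false =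
          L1 ++ keyLen x :: L2 := by
        rw [List.map_append, List.map_singleton, PySem.Set.ofList_append_singleton,
          PySem.Set.add_of_not_mem (by rw [PySem.Set.mem_ofList]; exact hmem),
          PySem.List.sorted_eq_foldl_insertBy, List.foldl_append]
        simp only [List.foldl_cons, List.foldl_nil]
        rw [← PySem.List.sorted_eq_foldl_insertBy, ← hL, hsplit]
        rw [insertBy_split _ _ L1 L2 (fun y hy => by have := hlt y hy; simp; omega)
          (fun y hy => by have := hL2 y (List.mem_of_mem_head? hy); simp; omega)]
      rw [hS, ih, hLnew, hsplit]
      rw [List.flatMap_append, List.flatMap_append, List.flatMap_cons]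
      rw [show L1.flatMap (fun ℓ => (u ++ [x]).filter (fun s => decide (keyLen s = ℓ))) =
            L1.flatMap (fun ℓ => u.filter (fun s => decide (keyLen s = ℓ))) from
        List.flatMap_congr (fun ℓ hℓ => by
          rw [hGapp ℓ, if_neg (by have := hlt ℓ hℓ; omega), List.append_nil])]
      rw [show L2.flatMap (fun ℓ => (u ++ [x]).filter (fun s => decide (keyLen s = ℓ))) =
            L2.flatMap (fun ℓ => u.filter (fun s => decide (keyLen s = ℓ))) from
        List.flatMap_congr (fun ℓ hℓ => by
          rw [hGapp ℓ, if_neg (by have := hL2 ℓ hℓ; omega), List.append_nil])]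
      rw [hGapp (keyLen x), if_pos rfl, hGx]
      rw [insertBy_split _ x (L1.flatMap (fun ℓ => u.filter (fun s => decide (keyLen s = ℓ))))
          (L2.flatMap (fun ℓ => u.filter (fun s => decide (keyLen s = ℓ))))
          (fun y hy => by have := hlt _ (key_of_mem_flatMap hy); simp; omega)
          (fun y hy => by
            have := hL2 _ (key_of_mem_flatMap (List.mem_of_mem_head? hy))
            simp; omega)]
      simp


def refStep (ne : List (List Int)) (s : List Int) : List (List Int) :=
  if ne.any (fun k => is_sublist_optimized k s) then ne else ne ++ [s]

def covInv (ne : List (List Int)) (enc : PySem.Set (List Int)) : Prop :=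
  ∀ t ∈ enc, ∃ k ∈ ne, is_sublist_optimized k t = true

theorem markInner_sound (t : List Int) (g : List (List Int)) (e : PySem.Set (List Int))
    (t' : List Int)
    (h : t' ∈ g.foldl (fun e2 t'' =>
        if is_sublist_optimized t t'' then PySem.Set.add e2 t'' else e2) e) :
    t' ∈ e ∨ is_sublist_optimized t t' = true := by
  induction g generalizing e with
  | nil => exact Or.inl h
  | cons a g ih =>
    rw [List.foldl_cons] at h
    rcases ih _ h with hmem | hsub
    · by_cases hc : is_sublist_optimized t a = true
      · rw [if_pos hc] at hmem
        rcases (PySem.Set.mem_add _ _ _).mp hmem with hmem | rfl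
        · exact Or.inl hmem
        · exact Or.inr hc
      · rw [if_neg hc] at hmem
        exact Or.inl hmem
    · exact Or.inr hsub

theorem mark_sound (groups : PySem.Dict Int (List (List Int))) (ls : List Int) (t : List Int)
    (enc : PySem.Set (List Int)) (t' : List Int)
    (h : t' ∈ ls.foldl (fun e ℓ' =>
      if groups.contains ℓ' then
        (groups.getD ℓ' []).foldl (fun e2 t'' =>
          if is_sublist_optimized t t'' then PySem.Set.add e2 t'' else e2) e
      else e) enc) :
    t' ∈ enc ∨ is_sublist_optimized t t' = true := by
  induction ls generalizing enc with
  | nil => exact Or.inl h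
  | cons a ls ih =>
    rw [List.foldl_cons] at h
    rcases ih _ h with hmem | hsub
    · by_cases hc : groups.contains a = true
      · rw [if_pos hc] at hmem
        exact markInner_sound t _ _ _ hmem
      · rw [if_neg hc] at hmem
        exact Or.inl hmem
    · exact Or.inr hsub

theorem aInner_eq_ref (groups : PySem.Dict Int (List (List Int))) (maxLen ℓ : Int)
    (g : List (List Int)) (ne : List (List Int)) (enc : PySem.Set (List Int))
    (hinv : covInv ne enc) :
    (g.foldl (aBody groups maxLen ℓ) (ne, enc)).1 = g.foldl refStep ne ∧
      covInv (g.foldl (aBody groups maxLen ℓ) (ne, enc)).1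
          (g.foldl (aBody groups maxLen ℓ) (ne, enc)).2 := by
  induction g generalizing ne enc with
  | nil => exact ⟨rfl, hinv⟩
  | cons t g ih =>
    rw [List.foldl_cons, List.foldl_cons]
    by_cases hc : PySem.Set.contains enc t = true
    · have hmem : t ∈ enc := (PySem.Set.contains_iff enc t).mp hc
      obtain ⟨k, hk, hsub⟩ := hinv t hmem
      have hany : ne.any (fun k => is_sublist_optimized k t) = true :=
        List.any_eq_true.mpr ⟨k, hk, hsub⟩
      have hbody : aBody groups maxLen ℓ (ne, enc) t = (ne, enc) := by
        unfold aBody; rw [if_pos hc]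
      have href : refStep ne t = ne := by unfold refStep; rw [if_pos hany]
      rw [hbody, href]
      exact ih ne enc hinv
    · by_cases hany : ne.any (fun k => is_sublist_optimized k t) = true
      · have hbody : aBody groups maxLen ℓ (ne, enc) t = (ne, enc) := by
          unfold aBody; rw [if_neg hc, if_pos hany]
        have href : refStep ne t = ne := by unfold refStep; rw [if_pos hany]
        rw [hbody, href]
        exact ih ne enc hinv
      · have hbody : aBody groups maxLen ℓ (ne, enc) t = (ne ++ [t],
            (PySem.List.pyRange (ℓ + 1) (maxLen + 1) 1).foldl (fun e ℓ' =>
              if groups.contains ℓ' then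
                (groups.getD ℓ' []).foldl (fun e2 t' =>
                  if is_sublist_optimized t t' then PySem.Set.add e2 t' else e2) e
              else e) enc) := by
          unfold aBody; rw [if_neg hc, if_neg hany]
        have href : refStep ne t = ne ++ [t] := by unfold refStep; rw [if_neg hany]
        rw [hbody, href]
        refine ih (ne ++ [t]) _ ?_
        intro t' hmem
        rcases mark_sound groups _ t enc t' hmem with hm | hs
        · obtain ⟨k, hk, hsub⟩ := hinv t' hm
          exact ⟨k, List.mem_append_left _ hk, hsub⟩
        · exact ⟨t, List.mem_append_right _ (List.mem_singleton.mpr rfl), hs⟩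

theorem aOuter_eq_ref (groups : PySem.Dict Int (List (List Int))) (maxLen : Int)
    (ls : List Int) (ne : List (List Int)) (enc : PySem.Set (List Int)) (hinv : covInv ne enc) :
    (ls.foldl (fun st ℓ => (groups.getD ℓ []).foldl (aBody groups maxLen ℓ) st) (ne, enc)).1 =
      (ls.flatMap (fun ℓ => groups.getD ℓ [])).foldl refStep ne := by
  induction ls generalizing ne enc with
  | nil => rfl
  | cons a ls ih =>
    rw [List.foldl_cons, List.flatMap_cons, List.foldl_append]
    obtain ⟨h1, h2⟩ := aInner_eq_ref groups maxLen a (groups.getD a []) ne enc hinv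
    rw [← h1]
    exact ih _ _ h2

-- per-length window membership agrees with A's window scan
theorem windows_eq (k seq : List Int) :
    (if (seq.length : Int) < (k.length : Int) then false
     else PySem.Set.contains (bWindows seq (k.length : Int)) k) =
      is_sublist_optimized k seq := by
  unfold bWindows is_sublist_optimized
  by_cases hknil : k = []
  · subst hknil
    simp only [List.length_nil, Nat.cast_zero]
    rw [if_pos trivial, if_neg (by omega)]
    refine (PySem.Set.contains_iff _ _).mpr
      ((PySem.Set.mem_ofList _ _).mpr (List.mem_map.mpr ⟨0, ?_, ?_⟩))
    · rw [PySem.List.mem_pyRange_one]; omega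
    · rw [PySem.List.slice_toNat seq (le_refl 0) (by omega)]
      simp
  · rw [if_neg hknil]
    by_cases hlt : seq.length < k.length
    · rw [if_pos (by exact_mod_cast hlt), if_pos (decide_eq_true hlt)]
    · rw [if_neg (by exact_mod_cast hlt), if_neg (by simpa using hlt)]
      rw [Bool.eq_iff_iff, PySem.Set.contains_iff, PySem.Set.mem_ofList, List.any_eq_true]
      constructor
      · intro hi
        obtain ⟨i, hi2, hk⟩ := List.mem_map.mp hi
        exact ⟨i, hi2, beq_iff_eq.mpr hk⟩
      · rintro ⟨i, hi, hk⟩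
        exact List.mem_map.mpr ⟨i, hi, beq_iff_eq.mp hk⟩

theorem bStep_covered (kept : List (List Int)) (seq : List Int) :
    List.any (PySem.Set.ofList (kept.map (fun s => (s.length : Int)))) (fun L =>
      if (seq.length : Int) < L then false
      else (kept.filter (fun k => (k.length : Int) == L)).any (fun k =>
        PySem.Set.contains (bWindows seq L) k)) =
      kept.any (fun k => is_sublist_optimized k seq) := by
  rw [Bool.eq_iff_iff, List.any_eq_true, List.any_eq_true]
  constructor
  · rintro ⟨L, _, hf⟩
    by_cases hlt : (seq.length : Int) < L
    · rw [if_pos hlt] at hf; cases hf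
    · rw [if_neg hlt, List.any_eq_true] at hf
      obtain ⟨k, hkmem, hc⟩ := hf
      obtain ⟨hk, hbeq⟩ := List.mem_filter.mp hkmem
      have hL : (k.length : Int) = L := beq_iff_eq.mp hbeq
      refine ⟨k, hk, ?_⟩
      rw [← windows_eq k seq, hL, if_neg hlt]
      exact hc
  · rintro ⟨k, hk, hsub⟩
    refine ⟨(k.length : Int), ?_, ?_⟩
    · rw [PySem.Set.mem_ofList]
      exact List.mem_map.mpr ⟨k, hk, rfl⟩
    · rw [← windows_eq k seq] at hsub
      by_cases hlt : (seq.length : Int) < (k.length : Int)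
      · rw [if_pos hlt] at hsub; cases hsub
      · rw [if_neg hlt] at hsub
        rw [if_neg hlt, List.any_eq_true]
        exact ⟨k, List.mem_filter.mpr ⟨hk, beq_iff_eq.mpr rfl⟩, hsub⟩

theorem bFold_eq_ref (l : List (List Int)) (kept : List (List Int)) (lens : PySem.Set Int)
    (hl : lens = PySem.Set.ofList (kept.map (fun s => (s.length : Int)))) :
    (l.foldl bStep (kept, lens)).1 = l.foldl refStep kept := by
  induction l generalizing kept lens with
  | nil => rfl
  | cons seq l ih =>
    rw [List.foldl_cons, List.foldl_cons]
    have hcov : bStep (kept, lens) seq =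
        if kept.any (fun k => is_sublist_optimized k seq) then (kept, lens)
        else (kept ++ [seq], PySem.Set.add lens (seq.length : Int)) := by
      unfold bStep
      rw [hl, bStep_covered]
    by_cases hany : kept.any (fun k => is_sublist_optimized k seq) = true
    · rw [hcov, if_pos hany, show refStep kept seq = kept from by unfold refStep; rw [if_pos hany]]
      exact ih kept lens hl
    · rw [hcov, if_neg hany,
        show refStep kept seq = kept ++ [seq] from by unfold refStep; rw [if_neg hany]]
      refine ih (kept ++ [seq]) _ ?_
      rw [hl, List.map_append, List.map_singleton, PySem.Set.ofList_append_singleton]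

-- ===== VERDICT (by name: the statement is the Claim_ definition above) =====
theorem get_non_encompassed_sequences_fast_spec : Claim_equal_get_non_encompassed_sequences_fast := by
  intro sequences _
  unfold Spec_get_non_encompassed_sequences_fast
  unfold get_non_encompassed_sequences_fast get_non_encompassed_sequences_fast_alt
  rw [show sequences.map (fun p => p) = sequences from List.map_id' sequences]
  rw [bFold_eq_ref _ [] PySem.Set.empty rfl]
  rw [show (fun (s : List Int) => ((s.length : Int))) = keyLen from rfl]
  by_cases hnil : sequences = []
  · subst hnil
    rfl
  · rw [if_neg hnil]
    by_cases hlen : (PySem.List.dedup sequences).length ≤ 1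
    · rw [if_pos hlen]
      rcases hu : PySem.List.dedup sequences with _ | ⟨t, r⟩
      · rw [List.Perm.eq_nil (PySem.List.sorted_perm [] keyLen false)]
        rfl
      · have hr : r = [] := by
          rw [hu] at hlen
          simp only [List.length_cons] at hlen
          exact List.length_eq_zero_iff.mp (by omega)
        subst hr
        rw [PySem.List.sorted_eq_self_of_pairwise _ _ (List.pairwise_singleton _ _)]
        simp [refStep]
    · rw [if_neg hlen]
      simp only [aGroups_keys]
      rw [aOuter_eq_ref _ _ _ [] PySem.Set.empty (fun t ht => absurd ht (List.not_mem_nil))]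
      rw [sorted_len_eq_flatMap,
        List.flatMap_congr (fun ℓ _ => (aGroups_getD (PySem.List.dedup sequences) ℓ))]
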